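-- pv_equiv track=rewrite | github.com/calexyoung/svs-browser | apps/backend/app/ingestion/html_parser.py | _detect_mime_type
-- ===== SOURCE A (Python) =====
-- def _detect_mime_type(url: str) -> str | None:
--     """Detect MIME type from URL."""
--     extension_map = {
--         ".mp4": "video/mp4",
--         ".m4v": "video/mp4",
--         ".mov": "video/quicktime",
--         ".webm": "video/webm",
--         ".mpeg": "video/mpeg",
--         ".mpg": "video/mpeg",
--         ".avi": "video/x-msvideo",
--         ".png": "image/png",
--         ".jpg": "image/jpeg",
--         ".jpeg": "image/jpeg",
--         ".tif": "image/tiff",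
--         ".tiff": "image/tiff",
--         ".gif": "image/gif",
--         ".vtt": "text/vtt",
--         ".srt": "text/plain",
--     }
--     url_lower = url.lower()
--     for ext, mime in extension_map.items():
--         if url_lower.endswith(ext):
--             return mime
--     return None
-- ===== SOURCE B (Python) =====
-- def _detect_mime_type(url: str) -> str | None:
--     """Detect MIME type from URL."""
--     extension_map = {
--         ".mp4": "video/mp4",
--         ".m4v": "video/mp4",
--         ".mov": "video/quicktime",
--         ".webm": "video/webm",
--         ".mpeg": "video/mpeg",
--         ".mpg": "video/mpeg",
--         ".avi": "video/x-msvideo",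
--         ".png": "image/png",
--         ".jpg": "image/jpeg",
--         ".jpeg": "image/jpeg",
--         ".tif": "image/tiff",
--         ".tiff": "image/tiff",
--         ".gif": "image/gif",
--         ".vtt": "text/vtt",
--         ".srt": "text/plain",
--     }
--     _head, sep, tail = url.lower().rpartition(".")
--     if not sep:
--         return None
--     return extension_map.get("." + tail)
-- ===== Notes on version B (the rewrite author's own statement) =====
-- stated objective: idiomatic
-- what changed: Instead of scanning all 15 table entries with endswith, B extracts the extension once with rpartition and does a single dict lookup on the computed key.
import Mathlib
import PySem

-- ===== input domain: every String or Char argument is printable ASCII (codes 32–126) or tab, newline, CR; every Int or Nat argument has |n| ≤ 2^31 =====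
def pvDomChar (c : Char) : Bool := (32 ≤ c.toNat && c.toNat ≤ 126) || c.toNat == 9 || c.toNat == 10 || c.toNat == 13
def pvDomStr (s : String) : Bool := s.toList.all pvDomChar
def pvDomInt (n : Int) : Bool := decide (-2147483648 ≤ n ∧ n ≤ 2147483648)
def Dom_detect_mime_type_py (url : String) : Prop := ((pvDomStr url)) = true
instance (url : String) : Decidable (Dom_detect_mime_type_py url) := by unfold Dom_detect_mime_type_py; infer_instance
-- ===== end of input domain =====

-- B replaces A's endswith scan over every table entry by extracting the extension once
-- (rpartition on '.') and doing a single dict lookup on the computed key (idiomatic).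

-- ===== PORT A =====
-- the literal dict from A's source, as an insertion-ordered association list
def pvMimeTable : List (String × String) :=
  [(".mp4", "video/mp4"), (".m4v", "video/mp4"), (".mov", "video/quicktime"),
   (".webm", "video/webm"), (".mpeg", "video/mpeg"), (".mpg", "video/mpeg"),
   (".avi", "video/x-msvideo"), (".png", "image/png"), (".jpg", "image/jpeg"),
   (".jpeg", "image/jpeg"), (".tif", "image/tiff"), (".tiff", "image/tiff"),
   (".gif", "image/gif"), (".vtt", "text/vtt"), (".srt", "text/plain")]

-- A's for-loop with early return over extension_map.items()
def pvScanA (s : String) : List (String × String) → Option String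
  | [] => none
  | (ext, mime) :: rest => if PySem.Str.endswith s ext then some mime else pvScanA s rest

def detect_mime_type_py (url : String) : Option String :=
  pvScanA (PySem.Str.lower url) (PySem.Dict.ofList pvMimeTable).items

-- ===== PORT B =====
-- hand port of str.rpartition('.'): tail = characters after the LAST '.', and the separator
-- was found iff '.' occurs in the string (the takeWhile over the reversed characters consumes
-- everything iff there is no '.'); exact for the parts B uses (the head part is discarded).
def detect_mime_type_py_alt (url : String) : Option String :=
  let rev := (PySem.Str.lower url).toList.reverse
  let tailRev := rev.takeWhile (· ≠ '.')
  if tailRev.length = rev.length then none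
  else (PySem.Dict.ofList pvMimeTable).get? (String.ofList ('.' :: tailRev.reverse))

-- ===== PRECONDITION & SPEC =====
def Spec_detect_mime_type_py (url : String) (out : Option String) : Prop := out = detect_mime_type_py_alt url
instance (url : String) (out : Option String) : Decidable (Spec_detect_mime_type_py url out) := by unfold Spec_detect_mime_type_py; infer_instance

-- ===== CLAIM (what is proved, stated in full; the proofs are below) =====
def Claim_equal_detect_mime_type_py : Prop := ∀ (url : String), Dom_detect_mime_type_py url → Spec_detect_mime_type_py url (detect_mime_type_py url)

-- ===== LEMMAS AND PROOFS =====

-- the dict built by ofList has the table itself as its items (all 15 keys are distinct)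
lemma pvOfList_eq : PySem.Dict.ofList pvMimeTable = PySem.Dict.mk pvMimeTable := by decide

lemma pvTakeWhile_self (e' : List Char) (he : '.' ∉ e') :
    e'.takeWhile (· ≠ '.') = e' := by
  rw [List.takeWhile_eq_self_iff]
  intro a ha
  simp only [decide_eq_true_eq]
  rintro rfl; exact he ha

lemma pvDropWhile_head {r : List Char} {c : Char} {t : List Char}
    (h : r.dropWhile (· ≠ '.') = c :: t) : c = '.' := by
  induction r with
  | nil => simp [List.dropWhile] at h
  | cons a l ih =>
    rw [List.dropWhile_cons] at h
    split at h
    · exact ih h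
    · next hna =>
      cases h
      simpa using hna

-- suffix "e' ++ ['.']" of the reversed string ↔ the run before the first '.' of the reverse is e'
lemma pvPrefix_iff (r e' : List Char) (he : '.' ∉ e') :
    (e' ++ ['.'] <+: r) ↔ ('.' ∈ r ∧ r.takeWhile (· ≠ '.') = e') := by
  constructor
  · rintro ⟨t, rfl⟩
    have h1 : e'.takeWhile (· ≠ '.') = e' := pvTakeWhile_self e' he
    have h2 : (e' ++ ['.']).takeWhile (· ≠ '.') = e' := by
      rw [List.takeWhile_append, if_pos (by rw [h1])]
      simp
    refine ⟨by simp, ?_⟩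
    rw [List.takeWhile_append, if_neg, h2]
    rw [h2]
    simp
  · rintro ⟨hdot, rfl⟩
    have hsplit := (List.takeWhile_append_dropWhile (p := (· ≠ '.')) (l := r)).symm
    rcases hd : r.dropWhile (· ≠ '.') with _ | ⟨c, t⟩
    · exfalso
      rw [hd, List.append_nil] at hsplit
      have := List.mem_takeWhile_imp (l := r) (p := (· ≠ '.')) (by rw [← hsplit]; exact hdot)
      simp at this
    · have hc : c = '.' := pvDropWhile_head hd
      have heq : r = r.takeWhile (· ≠ '.') ++ '.' :: t := by
        conv_lhs => rw [hsplit]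
        rw [hd, hc]
      exact ⟨t, by rw [List.append_assoc, List.singleton_append]; exact heq.symm⟩

-- endswith against a key '.'::e, characterised through the reversed string
lemma pvEndswith_iff (l e : List Char) (he : '.' ∉ e) :
    (PySem.Chars.endswith l ('.' :: e) = true)
      ↔ ('.' ∈ l ∧ l.reverse.takeWhile (· ≠ '.') = e.reverse) := by
  rw [PySem.Chars.endswith_iff, ← List.reverse_prefix]
  have h : ('.' :: e).reverse = e.reverse ++ ['.'] := by simp
  rw [h, pvPrefix_iff _ _ (by simpa using he)]
  simp

-- when the string contains a '.', A's scan equals the dict lookup at the computed key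
lemma pvScan_eq_get (l : List Char) (hdot : '.' ∈ l) :
    ∀ tbl : List (String × String),
      (∀ p ∈ tbl, ∃ e, p.1 = String.ofList ('.' :: e) ∧ '.' ∉ e) →
      pvScanA (String.ofList l) tbl
        = (PySem.Dict.mk tbl).get? (String.ofList ('.' :: (l.reverse.takeWhile (· ≠ '.')).reverse)) := by
  intro tbl
  induction tbl with
  | nil => intro _; simp [pvScanA, PySem.Dict.get?]
  | cons p rest ih =>
    intro h
    obtain ⟨e, hk, he⟩ := h p (List.mem_cons_self ..)
    obtain ⟨k, v⟩ := p
    simp only at hk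
    subst hk
    rw [pvScanA, PySem.Dict.get?_mk_cons]
    have hcond : (PySem.Str.endswith (String.ofList l) (String.ofList ('.' :: e)) = true)
        ↔ (l.reverse.takeWhile (· ≠ '.') = e.reverse) := by
      rw [PySem.Str.endswith_eq]
      show PySem.Chars.endswith (String.ofList l).toList (String.ofList ('.' :: e)).toList = true ↔ _
      rw [String.toList_ofList, String.toList_ofList, pvEndswith_iff l e he]
      exact and_iff_right hdot
    have hkey : ((String.ofList ('.' :: e) == String.ofList ('.' :: (l.reverse.takeWhile (· ≠ '.')).reverse)) = true)
        ↔ (l.reverse.takeWhile (· ≠ '.') = e.reverse) := by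
      rw [beq_iff_eq, String.ofList_inj, List.cons.injEq]
      constructor
      · rintro ⟨-, h2⟩; rw [h2]; simp
      · intro h2; exact ⟨rfl, by rw [h2]; simp⟩
    by_cases ht : l.reverse.takeWhile (· ≠ '.') = e.reverse
    · rw [if_pos (hcond.mpr ht), if_pos (hkey.mpr ht)]
    · rw [if_neg (fun hc => ht (hcond.mp hc)), if_neg (fun hc => ht (hkey.mp hc))]
      exact ih (fun q hq => h q (List.mem_cons_of_mem _ hq))

-- when the string contains no '.', A's scan over the table returns none
lemma pvScan_none (l : List Char) (hdot : '.' ∉ l) :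
    ∀ tbl : List (String × String),
      (∀ p ∈ tbl, ∃ e, p.1 = String.ofList ('.' :: e) ∧ '.' ∉ e) →
      pvScanA (String.ofList l) tbl = none := by
  intro tbl
  induction tbl with
  | nil => intro _; simp [pvScanA]
  | cons p rest ih =>
    intro h
    obtain ⟨e, hk, he⟩ := h p (List.mem_cons_self ..)
    obtain ⟨k, v⟩ := p
    simp only at hk
    subst hk
    rw [pvScanA, if_neg, ih (fun q hq => h q (List.mem_cons_of_mem _ hq))]
    intro hc
    rw [PySem.Str.endswith_eq] at hc
    have h' : PySem.Chars.endswith (String.ofList l).toList (String.ofList ('.' :: e)).toList = true := hc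
    rw [String.toList_ofList, String.toList_ofList] at h'
    exact hdot ((pvEndswith_iff l e he).mp h').1

-- every key of the table is '.' followed by dot-free characters
lemma pvTable_keys : ∀ p ∈ pvMimeTable, ∃ e, p.1 = String.ofList ('.' :: e) ∧ '.' ∉ e := by
  intro p hp
  fin_cases hp <;> exact ⟨_, rfl, by decide⟩

-- ===== VERDICT (by name: the statement is the Claim_ definition above) =====
theorem detect_mime_type_py_spec : Claim_equal_detect_mime_type_py := by
  intro url _
  show detect_mime_type_py url = detect_mime_type_py_alt url
  unfold detect_mime_type_py detect_mime_type_py_alt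
  rw [pvOfList_eq]
  set l : List Char := (PySem.Str.lower url).toList with hl
  have hmk : PySem.Str.lower url = String.ofList l := by rw [hl, String.ofList_toList]
  by_cases hdot : '.' ∈ l
  · have hne : l.reverse.takeWhile (· ≠ '.') ≠ l.reverse := by
      intro heq
      have h' := List.takeWhile_eq_self_iff.mp heq '.' (by simpa using hdot)
      simp at h'
    have hlen : ¬ (l.reverse.takeWhile (· ≠ '.')).length = l.reverse.length := by
      intro hlen
      exact hne ((List.takeWhile_prefix _).eq_of_length hlen)
    rw [hmk, pvScan_eq_get l hdot pvMimeTable pvTable_keys, if_neg hlen]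
  · have hall : l.reverse.takeWhile (· ≠ '.') = l.reverse :=
      pvTakeWhile_self l.reverse (by simpa using hdot)
    rw [hmk, pvScan_none l hdot pvMimeTable pvTable_keys, if_pos (by rw [hall])]
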